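-- pv_equiv track=rewrite | github.com/hjh0915/toronto_assignments | 2019-a2/palindromes.py | get_odd_palindrome_at
-- ===== SOURCE A (Python) =====
-- def is_palindrome_word(words: str) -> bool:
--     """判断words是否为回文
--     >>> is_palindrome_word("Madam, I'm Adam")
--     False
--     >>> is_palindrome_word("I'm a girl")
--     False
--     >>> is_palindrome_word("nurses run")
--     True
--     """
--     if words.islower():
--         words = words.replace(' ','')
--         if words == words[::-1]:
--             return True
--     return False
--
-- def get_odd_palindrome_at(words: str, position: int) -> str:
--     """返回一段回文，在words中最长的奇数长度的回文，并且集中在指定索引位置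
--     >>> get_odd_palindrome_at("that nurses run is right", 10)
--     'nurses run '
--     """
--     i = 0
--     s = []
--     s1 = []
--     while i < position < len(words)-i+1:
--         x = words[position-i:position+i+1]
--         if is_palindrome_word(x) and len(x)>1 and len(x)%2 != 0:
--             s.append((x, len(x)))
--         i = i + 1
--
--     for a, b in s:
--         s1.append(b)
--         if b == max(s1):
--             return a
--         else:
--             return ""
-- ===== SOURCE B (Python) =====
-- def get_odd_palindrome_at(words: str, position: int) -> str:
--     # Single early-exit scan: grow the radius from 1 and return the first
--     # odd-length lowercase space-ignoring palindrome centred at position.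
--     i = 1
--     while i < position < len(words) - i + 1:
--         x = words[position - i:position + i + 1]
--         if x.islower():
--             y = x.replace(' ', '')
--             if y == y[::-1] and len(x) % 2 == 1:
--                 return x
--         i = i + 1
-- ===== Notes on version B (the rewrite author's own statement) =====
-- stated objective: simpler
-- what changed: B replaces A's collect-all list of (palindrome, length) pairs plus a separate (effectively head-taking) selection loop with a single early-exit scan that returns the first odd lowercase space-ignoring palindrome as soon as it is found, starting the radius at 1 and dropping the now-redundant len(x)>1 check.
import Mathlib
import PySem

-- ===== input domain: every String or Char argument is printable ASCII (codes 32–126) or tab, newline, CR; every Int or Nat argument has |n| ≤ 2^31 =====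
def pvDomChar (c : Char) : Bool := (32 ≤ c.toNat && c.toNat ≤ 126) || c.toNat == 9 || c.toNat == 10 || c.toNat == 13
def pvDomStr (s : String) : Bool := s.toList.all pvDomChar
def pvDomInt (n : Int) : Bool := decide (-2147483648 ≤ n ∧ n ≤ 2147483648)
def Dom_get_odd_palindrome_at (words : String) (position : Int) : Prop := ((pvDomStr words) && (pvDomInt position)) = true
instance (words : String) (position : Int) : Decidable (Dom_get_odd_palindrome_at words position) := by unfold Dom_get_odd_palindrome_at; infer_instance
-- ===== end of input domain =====

-- B is a single early-exit scan (simpler): it returns the first centred odd palindrome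
-- directly instead of A's collect-all list plus a dead second selection loop.

-- str.islower(): some cased character and no uppercase one — exact on the ASCII domain
-- (shared primitive: both Pythons call the same built-in).
def pyStrIslower (s : String) : Bool :=
  s.toList.any PySem.Chars.islower && !(s.toList.any PySem.Chars.isupper)

-- ===== PORT A =====
def is_palindrome_word (words : String) : Bool :=
  if pyStrIslower words then
    let w := PySem.Str.replace words " " ""
    if PySem.Str.slice? w none none (-1) == some w then true else false
  else false

def pvALoop (words : String) (position : Int) (i : Int) (s : List (String × Int)) :
    List (String × Int) :=
  if i < position ∧ position < PySem.Str.len words - i + 1 then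
    let x := PySem.Str.slice words (some (position - i)) (some (position + i + 1))
    let s' := if is_palindrome_word x && decide (1 < PySem.Str.len x)
                 && decide (PySem.Int.mod (PySem.Str.len x) 2 ≠ 0)
              then s ++ [(x, PySem.Str.len x)] else s
    pvALoop words position (i + 1) s'
  else s
termination_by (position - i).toNat
decreasing_by omega

-- the for-loop over s: its body returns on the very first element
def pvASelect (s : List (String × Int)) (s1 : List Int) : Option String :=
  match s with
  | [] => none
  | (a, b) :: _ =>
    let s1' := s1 ++ [b]
    if some b == PySem.List.max? s1' id then some a else some ""

def get_odd_palindrome_at (words : String) (position : Int) : Option String :=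
  pvASelect (pvALoop words position 0 []) []

-- ===== PORT B =====
def pvBLoop (words : String) (position : Int) (i : Int) : Option String :=
  if i < position ∧ position < PySem.Str.len words - i + 1 then
    let x := PySem.Str.slice words (some (position - i)) (some (position + i + 1))
    if pyStrIslower x then
      let y := PySem.Str.replace x " " ""
      if (PySem.Str.slice? y none none (-1) == some y)
         && (PySem.Int.mod (PySem.Str.len x) 2 == 1) then some x
      else pvBLoop words position (i + 1)
    else pvBLoop words position (i + 1)
  else none
termination_by (position - i).toNat
decreasing_by all_goals omega

def get_odd_palindrome_at_alt (words : String) (position : Int) : Option String :=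
  pvBLoop words position 1

-- ===== PRECONDITION & SPEC =====
def Spec_get_odd_palindrome_at (words : String) (position : Int) (out : Option String) : Prop := out = get_odd_palindrome_at_alt words position
instance (words : String) (position : Int) (out : Option String) : Decidable (Spec_get_odd_palindrome_at words position out) := by unfold Spec_get_odd_palindrome_at; infer_instance

-- ===== CLAIM (what is proved, stated in full; the proofs are below) =====
def Claim_equal_get_odd_palindrome_at : Prop := ∀ (words : String) (position : Int), Dom_get_odd_palindrome_at words position → Spec_get_odd_palindrome_at words position (get_odd_palindrome_at words position)

-- ===== LEMMAS AND PROOFS =====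

theorem pv_isp_eq (x : String) :
    is_palindrome_word x
      = (pyStrIslower x
          && (PySem.Str.slice? (PySem.Str.replace x " " "") none none (-1)
               == some (PySem.Str.replace x " " ""))) := by
  unfold is_palindrome_word
  cases h : pyStrIslower x <;> simp_all [Bool.beq_eq_decide_eq]

theorem pvALoop_acc (words : String) (position : Int) :
    ∀ (n : Nat) (i : Int) (s : List (String × Int)), (position - i).toNat ≤ n →
      pvALoop words position i s = s ++ pvALoop words position i [] := by
  intro n
  induction n with
  | zero =>
    intro i s h
    conv_lhs => rw [pvALoop]
    conv_rhs => rw [pvALoop]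
    split
    · rename_i hc; omega
    · simp
  | succ n ih =>
    intro i s h
    conv_lhs => rw [pvALoop]
    conv_rhs => rw [pvALoop]
    split
    · rename_i hc
      dsimp only
      split
      · rw [ih (i + 1) _ (by omega)]
        conv_rhs => rw [ih (i + 1) _ (by omega)]
        simp
      · exact ih (i + 1) _ (by omega)
    · simp

theorem pvASelect_head (s : List (String × Int)) :
    pvASelect s [] = s.head?.map Prod.fst := by
  cases s with
  | nil => rfl
  | cons hd tl =>
    obtain ⟨a, b⟩ := hd
    simp [pvASelect, PySem.List.max?]

-- length of the slice words[position-i : position+i+1]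
theorem pv_len_slice (words : String) (p i : Int) (h0 : 0 ≤ i) (h1 : 0 ≤ p - i)
    (h2 : p - i ≤ (words.toList.length : Int)) :
    PySem.Str.len (PySem.Str.slice words (some (p - i)) (some (p + i + 1)))
      = min (p + i + 1) (words.toList.length : Int) - (p - i) := by
  rw [PySem.Str.len_eq, PySem.Str.toList_slice, PySem.Chars.slice_eq_listSlice,
    PySem.List.length_slice]
  simp only [PySem.List.clampIdx, min_def]
  split_ifs <;> omega

theorem pv_main (words : String) (position : Int) :
    ∀ (n : Nat) (i : Int), 1 ≤ i → (position - i).toNat ≤ n →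
      (pvALoop words position i []).head?.map Prod.fst = pvBLoop words position i := by
  intro n
  induction n with
  | zero =>
    intro i hi h
    rw [pvALoop, pvBLoop]
    split
    · rename_i hc; omega
    · rfl
  | succ n ih =>
    intro i hi h
    rw [pvALoop, pvBLoop]
    split
    · rename_i hc
      dsimp only
      have hN : PySem.Str.len words = (words.toList.length : Int) := PySem.Str.len_eq words
      rw [hN] at hc
      have hlen := pv_len_slice words position i (by omega) (by omega) (by omega)
      rw [pv_isp_eq]
      by_cases hfull : position + i + 1 ≤ (words.toList.length : Int)
      · have hx : PySem.Str.len
            (PySem.Str.slice words (some (position - i)) (some (position + i + 1)))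
            = 2 * i + 1 := by rw [hlen, min_eq_left hfull]; ring
        have h1 : decide (1 < PySem.Str.len
            (PySem.Str.slice words (some (position - i)) (some (position + i + 1)))) = true := by
          rw [hx]; simp; omega
        have h2 : PySem.Int.mod (PySem.Str.len
            (PySem.Str.slice words (some (position - i)) (some (position + i + 1)))) 2 = 1 := by
          rw [hx]; simp [PySem.Int.mod]
        rw [h1, h2]
        cases hlow : pyStrIslower
            (PySem.Str.slice words (some (position - i)) (some (position + i + 1)))
        · simp only [Bool.false_and, if_neg (by simp : ¬ (false = true))]
          exact ih (i + 1) (by omega) (by omega)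
        · simp only [Bool.true_and]
          cases heq : (PySem.Str.slice? (PySem.Str.replace
              (PySem.Str.slice words (some (position - i)) (some (position + i + 1))) " " "")
              none none (-1)
              == some (PySem.Str.replace
              (PySem.Str.slice words (some (position - i)) (some (position + i + 1))) " " ""))
          · simp only [Bool.false_and, Bool.and_true, if_neg (by simp : ¬ (false = true))]
            exact ih (i + 1) (by omega) (by omega)
          · simp only [Bool.and_true]
            rw [pvALoop_acc words position ((position - (i + 1)).toNat) (i + 1) _ (by omega)]
            simp
      · have hend : position + i = (words.toList.length : Int) := by omega
        have hx : PySem.Str.len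
            (PySem.Str.slice words (some (position - i)) (some (position + i + 1)))
            = 2 * i := by rw [hlen, min_eq_right (by omega)]; omega
        have h2 : PySem.Int.mod (PySem.Str.len
            (PySem.Str.slice words (some (position - i)) (some (position + i + 1)))) 2 = 0 := by
          rw [hx]; simp [PySem.Int.mod]
        rw [h2]
        have hrec := ih (i + 1) (by omega) (by omega)
        simp [hrec]
    · rfl

-- ===== VERDICT (by name: the statement is the Claim_ definition above) =====
theorem get_odd_palindrome_at_spec : Claim_equal_get_odd_palindrome_at := by
  intro words position _
  unfold Spec_get_odd_palindrome_at get_odd_palindrome_at get_odd_palindrome_at_alt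
  rw [pvASelect_head]
  have hN : PySem.Str.len words = (words.toList.length : Int) := PySem.Str.len_eq words
  rw [pvALoop]
  split
  · rename_i hc
    dsimp only
    rw [hN] at hc
    have hlen := pv_len_slice words position 0 (by omega) (by omega) (by omega)
    have hmin := min_le_left (position + 0 + 1) ((words.toList.length : Int))
    have h1 : decide (1 < PySem.Str.len
        (PySem.Str.slice words (some (position - 0)) (some (position + 0 + 1)))) = false := by
      simp only [decide_eq_false_iff_not, not_lt]
      rw [hlen]
      omega
    rw [h1]
    simp only [Bool.and_false, Bool.false_and, if_neg (by simp : ¬ (false = true))]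
    exact pv_main words position ((position - 1).toNat) 1 (by omega) (by omega)
  · rename_i hc
    rw [hN] at hc
    rw [pvBLoop, if_neg (by omega)]
    rfl
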